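-- pv_equiv track=rewrite | github.com/lorenzobruno7/ICSOT_Sploit | icssploit/modules/scanners/bacnet_scan.py | parse_script_output
-- ===== SOURCE A (Python) =====
-- def parse_script_output(script_output):
--     """
--     Parses the script_output into a list of lists for export.
--     """
--     parsed_data = []
--     data = {}
--     for line in script_output.splitlines():
--         if ": " in line:
--             key, value = line.split(": ", 1)
--             data[key.strip()] = value.strip()
--
--     # Convert the dictionary into a list in the order of TABLE_HEADER
--     row = [
--         data.get("Vendor ID", ""),
--         data.get("Vendor Name", ""),
--         data.get("Object-identifier", ""),
--         data.get("Firmware", ""),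
--         data.get("Application Software", ""),
--         data.get("Object Name", ""),
--         data.get("Model Name", "")
--     ]
--     parsed_data.append(row)
--     return parsed_data
-- ===== SOURCE B (Python) =====
-- HEADERS = ("Vendor ID", "Vendor Name", "Object-identifier", "Firmware",
--            "Application Software", "Object Name", "Model Name")
--
-- def _last_value(rev_lines, header):
--     # scan the lines back-to-front; the first match is the last occurrence
--     for line in rev_lines:
--         if ": " in line:
--             key, value = line.split(": ", 1)
--             if key.strip() == header:
--                 return value.strip()
--     return ""
--
-- def parse_script_output(script_output):
--     rev_lines = script_output.splitlines()[::-1]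
--     return [[_last_value(rev_lines, h) for h in HEADERS]]
-- ===== Notes on version B (the rewrite author's own statement) =====
-- stated objective: alternative
-- what changed: B builds no dictionary at all: it reverses the line list once and computes each of the 7 columns independently by a backward search that returns the first (i.e. last-occurring) matching key's stripped value, instead of A's single accumulating pass plus a seven-get extraction phase.
import Mathlib
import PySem

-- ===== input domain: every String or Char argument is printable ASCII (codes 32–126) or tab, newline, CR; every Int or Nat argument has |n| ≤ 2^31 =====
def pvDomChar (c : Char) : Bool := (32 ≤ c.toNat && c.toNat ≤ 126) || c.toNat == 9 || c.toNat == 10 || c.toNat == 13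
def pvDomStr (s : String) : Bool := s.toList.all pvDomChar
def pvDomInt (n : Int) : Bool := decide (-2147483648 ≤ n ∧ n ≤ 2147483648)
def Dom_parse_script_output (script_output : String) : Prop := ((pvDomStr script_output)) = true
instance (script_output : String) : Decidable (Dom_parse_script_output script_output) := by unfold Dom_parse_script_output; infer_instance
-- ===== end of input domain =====

-- B builds no dictionary: it reverses the line list once and computes each column by a
-- backward search for the last occurrence of its header (alternative decomposition).

-- ===== PORT A =====
-- one loop iteration: if ": " in line, split on first ": " and store stripped key/value
def pvStepA (d : PySem.Dict String String) (line : String) : PySem.Dict String String :=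
  if PySem.Str.isIn ": " line then
    match PySem.Str.splitMax? line ": " 1 with
    | some (key :: value :: _) => d.insert (PySem.Str.strip key) (PySem.Str.strip value)
    | _ => d  -- unreachable: ": " ∈ line guarantees a 2-element split (Python's unpacking succeeds)
  else d

def parse_script_output (script_output : String) : List (List String) :=
  let data := (PySem.Str.splitlines script_output).foldl pvStepA PySem.Dict.empty
  let row := [data.getD "Vendor ID" "", data.getD "Vendor Name" "",
              data.getD "Object-identifier" "", data.getD "Firmware" "",
              data.getD "Application Software" "", data.getD "Object Name" "",
              data.getD "Model Name" ""]
  [row]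

-- ===== PORT B =====
-- _last_value: scan the reversed lines; first match = last occurrence; "" if none
def pvLastValue (revLines : List String) (header : String) : String :=
  match revLines with
  | [] => ""
  | line :: rest =>
    if PySem.Str.isIn ": " line then
      match PySem.Str.splitMax? line ": " 1 with
      | some (key :: value :: _) =>
          if PySem.Str.strip key = header then PySem.Str.strip value
          else pvLastValue rest header
      | _ => pvLastValue rest header  -- unreachable, as in port A
    else pvLastValue rest header

def pvHeaders : List String :=
  ["Vendor ID", "Vendor Name", "Object-identifier", "Firmware",
   "Application Software", "Object Name", "Model Name"]

def parse_script_output_alt (script_output : String) : List (List String) :=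
  -- lines[::-1]: slice with step -1 (step ≠ 0, so slice? always returns some)
  let revLines := (PySem.List.slice? (PySem.Str.splitlines script_output) none none (-1)).getD []
  [pvHeaders.map (pvLastValue revLines)]

-- ===== PRECONDITION & SPEC =====
def Spec_parse_script_output (script_output : String) (out : List (List String)) : Prop := out = parse_script_output_alt script_output
instance (script_output : String) (out : List (List String)) : Decidable (Spec_parse_script_output script_output out) := by unfold Spec_parse_script_output; infer_instance

-- ===== CLAIM (what is proved, stated in full; the proofs are below) =====
def Claim_equal_parse_script_output : Prop := ∀ (script_output : String), Dom_parse_script_output script_output → Spec_parse_script_output script_output (parse_script_output script_output)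

-- ===== LEMMAS AND PROOFS =====

-- optional-valued backward search, proof helper
def pvFind? (revLines : List String) (header : String) : Option String :=
  match revLines with
  | [] => none
  | line :: rest =>
    if PySem.Str.isIn ": " line then
      match PySem.Str.splitMax? line ": " 1 with
      | some (key :: value :: _) =>
          if PySem.Str.strip key = header then some (PySem.Str.strip value)
          else pvFind? rest header
      | _ => pvFind? rest header
    else pvFind? rest header

lemma pvLastValue_eq_find (revLines : List String) (h : String) :
    pvLastValue revLines h = (pvFind? revLines h).getD "" := by
  induction revLines with
  | nil => rfl
  | cons l ls ih =>
    unfold pvLastValue pvFind?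
    split_ifs with h1
    · cases hs : PySem.Str.splitMax? l ": " 1 with
      | none => exact ih
      | some parts =>
        match parts with
        | [] => exact ih
        | [_] => exact ih
        | k :: v :: rest => by_cases hk : PySem.Str.strip k = h <;> simp [hk, ih]
    · exact ih

lemma pvFind?_append (xs ys : List String) (h : String) :
    pvFind? (xs ++ ys) h = (pvFind? xs h).or (pvFind? ys h) := by
  induction xs with
  | nil => simp [pvFind?]
  | cons x xs ihx =>
    rw [List.cons_append]
    conv_lhs => rw [pvFind?]
    conv_rhs => rw [pvFind?]
    split_ifs with h1
    · cases hs : PySem.Str.splitMax? x ": " 1 with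
      | none => exact ihx
      | some parts =>
        match parts with
        | [] => exact ihx
        | [_] => exact ihx
        | k :: v :: rest => by_cases hk : PySem.Str.strip k = h <;> simp [hk, ihx]
    · exact ihx

lemma pvFold_find (lines : List String) (d : PySem.Dict String String) (h : String) :
    (lines.foldl pvStepA d).getD h "" =
      match pvFind? lines.reverse h with
      | some v => v
      | none => d.getD h "" := by
  induction lines generalizing d with
  | nil => rfl
  | cons l ls ih =>
    simp only [List.foldl_cons, List.reverse_cons]
    rw [ih, pvFind?_append]
    cases hf : pvFind? ls.reverse h with
    | some v => rfl
    | none =>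
      simp only [Option.or]
      unfold pvFind? pvStepA
      split_ifs with h1
      · cases hs : PySem.Str.splitMax? l ": " 1 with
        | none => rfl
        | some parts =>
          match parts with
          | [] => rfl
          | [_] => rfl
          | k :: v :: rest =>
            by_cases hk : PySem.Str.strip k = h
            · simp [hk]
            · simp [hk, PySem.Dict.getD_insert, Ne.symm hk, pvFind?]
      · rfl

lemma pvColumn (lines : List String) (h : String) :
    pvLastValue lines.reverse h = (lines.foldl pvStepA PySem.Dict.empty).getD h "" := by
  rw [pvLastValue_eq_find, pvFold_find]
  cases pvFind? lines.reverse h <;> rfl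

-- ===== VERDICT (by name: the statement is the Claim_ definition above) =====
theorem parse_script_output_spec : Claim_equal_parse_script_output := by
  intro s _
  unfold Spec_parse_script_output parse_script_output parse_script_output_alt
  have hrev : (PySem.List.slice? (PySem.Str.splitlines s) none none (-1)).getD [] =
      (PySem.Str.splitlines s).reverse := by
    rw [PySem.List.slice?_none_none_neg_one]; rfl
  rw [hrev]
  simp only [pvHeaders, List.map, pvColumn]
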